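-- pv_equiv track=rewrite | github.com/J300-0/minor | formatter/stages/layout_parser.py | _md_to_blocks
-- ===== SOURCE A (Python) =====
-- def _md_to_blocks(md: str) -> list[str]:
--     """
--     Split pix2text Markdown into double-newline-separated blocks,
--     keeping $$...$$ display math blocks intact.
--     """
--     blocks          = []
--     current         = []
--     in_display_math = False
--
--     for line in md.split("\n"):
--         stripped = line.strip()
--
--         if stripped == "$$":
--             if in_display_math:
--                 current.append("$$")
--                 blocks.append("\n".join(current))
--                 current = []
--                 in_display_math = False
--             else:
--                 if current:
--                     blocks.append("\n".join(current))
--                     current = []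
--                 current.append("$$")
--                 in_display_math = True
--             continue
--
--         if in_display_math:
--             current.append(line)
--             continue
--
--         if stripped == "":
--             if current:
--                 blocks.append("\n".join(current))
--                 current = []
--         else:
--             current.append(line)
--
--     if current:
--         blocks.append("\n".join(current))
--
--     return blocks
-- ===== SOURCE B (Python) =====
-- def _md_to_blocks(md: str) -> list[str]:
--     """Region decomposition: cut the line list at the display-math fence lines,
--     then emit math blocks and blank-separated text runs per region (no state flag)."""
--     return _blocks(md.split("\n"))
--
--
-- def _break_fence(lines):
--     # (lines before the first fence line, remainder starting at that fence or [])
--     for i, ln in enumerate(lines):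
--         if ln.strip() == "$$":
--             return lines[:i], lines[i:]
--     return lines, []
--
--
-- def _text_blocks(lines):
--     # maximal runs of non-blank lines, each joined by "\n"
--     runs = []
--     i, n = 0, len(lines)
--     while i < n:
--         if lines[i].strip() == "":
--             i += 1
--             continue
--         j = i
--         while j < n and lines[j].strip() != "":
--             j += 1
--         runs.append("\n".join(lines[i:j]))
--         i = j
--     return runs
--
--
-- def _blocks(lines):
--     blocks = []
--     while True:
--         pre, rest = _break_fence(lines)
--         blocks += _text_blocks(pre)
--         if not rest:
--             return blocks
--         body, rest2 = _break_fence(rest[1:])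
--         if not rest2:
--             blocks.append("\n".join(["$$"] + body))
--             return blocks
--         blocks.append("\n".join(["$$"] + body + ["$$"]))
--         lines = rest2[1:]
-- ===== Notes on version B (the rewrite author's own statement) =====
-- stated objective: alternative
-- what changed: Replaced A's single-pass state machine (an in-display-math flag plus a running accumulator) by a region decomposition: the line list is cut at the display-math fence lines, each math region is emitted as one block and each plain region is split into blank-separated runs.
import Mathlib
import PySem

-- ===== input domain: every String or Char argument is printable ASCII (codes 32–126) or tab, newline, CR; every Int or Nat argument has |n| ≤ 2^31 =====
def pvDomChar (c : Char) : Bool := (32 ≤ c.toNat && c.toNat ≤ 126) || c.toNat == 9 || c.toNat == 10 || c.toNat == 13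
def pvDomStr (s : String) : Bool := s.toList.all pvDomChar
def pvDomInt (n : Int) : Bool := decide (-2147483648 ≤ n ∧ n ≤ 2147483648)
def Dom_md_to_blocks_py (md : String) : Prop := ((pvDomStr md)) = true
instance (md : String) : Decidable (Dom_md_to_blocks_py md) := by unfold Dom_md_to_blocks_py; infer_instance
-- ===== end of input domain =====

-- B replaces A's single-pass in_display_math state machine by a region decomposition
-- (cut the line list at the display-math fence lines, then handle math regions and
-- blank-separated text runs separately); same cost, no speed claim.

-- ===== PORT A =====
-- one iteration of A's for-loop; state = (blocks, current, in_display_math)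
def pvAStep (st : List String × List String × Bool) (line : String) :
    List String × List String × Bool :=
  let blocks := st.1
  let current := st.2.1
  let inMath := st.2.2
  let stripped := PySem.Str.strip line
  if stripped = "$$" then
    if inMath then
      (blocks ++ [PySem.Str.join "\n" (current ++ ["$$"])], [], false)
    else
      if current = [] then (blocks, ["$$"], true)
      else (blocks ++ [PySem.Str.join "\n" current], ["$$"], true)
  else if inMath then
    (blocks, current ++ [line], true)
  else if stripped = "" then
    if current = [] then (blocks, current, false)
    else (blocks ++ [PySem.Str.join "\n" current], [], false)
  else
    (blocks, current ++ [line], false)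

-- md.split("\n"): split? is none only for an empty separator, so getD never fires
def md_to_blocks_py (md : String) : List String :=
  let st := ((PySem.Str.split? md "\n").getD []).foldl pvAStep ([], [], false)
  if st.2.1 = [] then st.1 else st.1 ++ [PySem.Str.join "\n" st.2.1]

-- ===== PORT B =====
-- Source B _break_fence: lines before the first fence line, remainder starting at it (or [])
def pvBreakFence : List String → List String × List String
  | [] => ([], [])
  | l :: ls =>
    if PySem.Str.strip l = "$$" then ([], l :: ls)
    else
      let p := pvBreakFence ls
      (l :: p.1, p.2)

-- Source B _text_blocks inner scan (the j-loop): the maximal leading non-blank run and the rest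
def pvTakeRun : List String → List String × List String
  | [] => ([], [])
  | l :: ls =>
    if PySem.Str.strip l = "" then ([], l :: ls)
    else
      let p := pvTakeRun ls
      (l :: p.1, p.2)

theorem pvTakeRun_snd_le (ls : List String) : (pvTakeRun ls).2.length ≤ ls.length := by
  induction ls with
  | nil => simp [pvTakeRun]
  | cons l ls ih =>
    simp only [pvTakeRun]
    split
    · simp
    · simpa using le_trans ih (by simp)

-- Source B _text_blocks outer loop
def pvTextBlocks : List String → List String
  | [] => []
  | l :: ls =>
    if PySem.Str.strip l = "" then pvTextBlocks ls
    else
      let p := pvTakeRun ls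
      PySem.Str.join "\n" (l :: p.1) :: pvTextBlocks p.2
termination_by ls => ls.length
decreasing_by
  · simp
  · exact Nat.lt_succ_of_le (pvTakeRun_snd_le ls)

theorem pvBreakFence_append (ls : List String) :
    (pvBreakFence ls).1 ++ (pvBreakFence ls).2 = ls := by
  induction ls with
  | nil => simp [pvBreakFence]
  | cons l ls ih =>
    simp only [pvBreakFence]
    split
    · simp
    · simpa using ih

-- Source B _blocks: the while-True tail loop as structural recursion on the remaining lines
def pvBlocks (lines : List String) : List String :=
  match h : pvBreakFence lines with
  | (pre, []) => pvTextBlocks pre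
  | (pre, _ :: rest) =>
    match h2 : pvBreakFence rest with
    | (body, []) => pvTextBlocks pre ++ [PySem.Str.join "\n" ("$$" :: body)]
    | (body, _ :: rest2) =>
      pvTextBlocks pre ++
        (PySem.Str.join "\n" ("$$" :: body ++ ["$$"]) :: pvBlocks rest2)
termination_by lines.length
decreasing_by
  have hl := pvBreakFence_append lines
  have hr := pvBreakFence_append rest
  rw [h] at hl
  rw [h2] at hr
  have h1 : rest.length < lines.length := by
    rw [← hl]; simp; omega
  have h2' : rest2.length < rest.length := by
    rw [← hr]; simp; omega
  omega

def md_to_blocks_py_alt (md : String) : List String :=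
  pvBlocks ((PySem.Str.split? md "\n").getD [])

-- ===== PRECONDITION & SPEC =====
def Spec_md_to_blocks_py (md : String) (out : List String) : Prop := out = md_to_blocks_py_alt md
instance (md : String) (out : List String) : Decidable (Spec_md_to_blocks_py md out) := by unfold Spec_md_to_blocks_py; infer_instance

-- ===== CLAIM (what is proved, stated in full; the proofs are below) =====
def Claim_equal_md_to_blocks_py : Prop := ∀ (md : String), Dom_md_to_blocks_py md → Spec_md_to_blocks_py md (md_to_blocks_py md)

-- ===== LEMMAS AND PROOFS =====

-- blocks emitted by A's text-mode loop over fence-free lines, from pending run `cur`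
def pvTbAux (cur : List String) : List String → List String
  | [] => []
  | l :: ls =>
    if PySem.Str.strip l = "" then
      (if cur = [] then pvTbAux [] ls else PySem.Str.join "\n" cur :: pvTbAux [] ls)
    else pvTbAux (cur ++ [l]) ls

-- pending run left by A's text-mode loop over fence-free lines
def pvCurAux (cur : List String) : List String → List String
  | [] => cur
  | l :: ls =>
    if PySem.Str.strip l = "" then pvCurAux [] ls else pvCurAux (cur ++ [l]) ls

def pvFlush (c : List String) : List String :=
  if c = [] then [] else [PySem.Str.join "\n" c]

def pvFinish (st : List String × List String × Bool) : List String :=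
  if st.2.1 = [] then st.1 else st.1 ++ [PySem.Str.join "\n" st.2.1]

theorem pvBreakFence_fst_no_fence (ls : List String) :
    ∀ l ∈ (pvBreakFence ls).1, PySem.Str.strip l ≠ "$$" := by
  induction ls with
  | nil => simp [pvBreakFence]
  | cons l ls ih =>
    simp only [pvBreakFence]
    split
    · simp
    · rename_i hne
      intro x hx
      simp at hx
      rcases hx with rfl | hx
      · exact hne
      · exact ih x hx

theorem pvBreakFence_snd_head (ls : List String) (g : String) (rest : List String)
    (h : (pvBreakFence ls).2 = g :: rest) : PySem.Str.strip g = "$$" := by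
  induction ls with
  | nil => simp [pvBreakFence] at h
  | cons l ls ih =>
    simp only [pvBreakFence] at h
    split at h
    · rename_i hf
      simp at h
      rw [← h.1]; exact hf
    · exact ih h

-- unfolding lemmas for pvBlocks, one per shape of the fence decomposition
theorem pvBlocks_no_fence (lines pre : List String)
    (hp : pvBreakFence lines = (pre, [])) : pvBlocks lines = pvTextBlocks pre := by
  rw [pvBlocks]
  split
  · rename_i pre' h'
    rw [hp] at h'
    simp_all
  · rename_i pre' f' rest' h'
    rw [hp] at h'
    simp_all

theorem pvBlocks_one_fence (lines pre : List String) (f : String) (rest body : List String)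
    (hp : pvBreakFence lines = (pre, f :: rest)) (hq : pvBreakFence rest = (body, [])) :
    pvBlocks lines = pvTextBlocks pre ++ [PySem.Str.join "\n" ("$$" :: body)] := by
  rw [pvBlocks]
  split
  · rename_i pre' h'
    rw [hp] at h'
    simp_all
  · rename_i pre' f' rest' h'
    rw [hp] at h'
    obtain ⟨h1, h2, h3⟩ : pre = pre' ∧ f = f' ∧ rest = rest' := by simp_all
    subst h1; subst h2; subst h3
    split
    · rename_i body' h''
      rw [hq] at h''
      simp_all
    · rename_i body' g' rest2' h''
      rw [hq] at h''
      simp_all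

theorem pvBlocks_two_fences (lines pre : List String) (f : String) (rest body : List String)
    (g : String) (rest2 : List String)
    (hp : pvBreakFence lines = (pre, f :: rest))
    (hq : pvBreakFence rest = (body, g :: rest2)) :
    pvBlocks lines = pvTextBlocks pre ++
      (PySem.Str.join "\n" ("$$" :: body ++ ["$$"]) :: pvBlocks rest2) := by
  rw [pvBlocks]
  split
  · rename_i pre' h'
    rw [hp] at h'
    simp_all
  · rename_i pre' f' rest' h'
    rw [hp] at h'
    obtain ⟨h1, h2, h3⟩ : pre = pre' ∧ f = f' ∧ rest = rest' := by simp_all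
    subst h1; subst h2; subst h3
    split
    · rename_i body' h''
      rw [hq] at h''
      simp_all
    · rename_i body' g' rest2' h''
      rw [hq] at h''
      obtain ⟨k1, k2, k3⟩ : body = body' ∧ g = g' ∧ rest2 = rest2' := by simp_all
      subst k1; subst k2; subst k3
      rfl

theorem pvFoldText (pre : List String) : ∀ (blocks cur : List String),
    (∀ l ∈ pre, PySem.Str.strip l ≠ "$$") →
    pre.foldl pvAStep (blocks, cur, false) = (blocks ++ pvTbAux cur pre, pvCurAux cur pre, false) := by
  induction pre with
  | nil => simp [pvTbAux, pvCurAux]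
  | cons l ls ih =>
    intro blocks cur hnf
    have hl : PySem.Str.strip l ≠ "$$" := hnf l (by simp)
    have hls : ∀ x ∈ ls, PySem.Str.strip x ≠ "$$" := fun x hx => hnf x (by simp [hx])
    simp only [List.foldl_cons]
    by_cases hb : PySem.Str.strip l = ""
    · by_cases hc : cur = []
      · subst hc
        have hstep : pvAStep (blocks, [], false) l = (blocks, [], false) := by
          simp [pvAStep, hl, hb]
        rw [hstep, ih blocks [] hls]
        simp [pvTbAux, pvCurAux, hb]
      · have hstep : pvAStep (blocks, cur, false) l
            = (blocks ++ [PySem.Str.join "\n" cur], [], false) := by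
          simp [pvAStep, hl, hb, hc]
        rw [hstep, ih _ [] hls]
        simp [pvTbAux, pvCurAux, hb, hc]
    · have hstep : pvAStep (blocks, cur, false) l = (blocks, cur ++ [l], false) := by
        simp [pvAStep, hl, hb]
      rw [hstep, ih blocks (cur ++ [l]) hls]
      simp [pvTbAux, pvCurAux, hb]

theorem pvFoldMath (body : List String) : ∀ (blocks cur : List String),
    (∀ l ∈ body, PySem.Str.strip l ≠ "$$") →
    body.foldl pvAStep (blocks, cur, true) = (blocks, cur ++ body, true) := by
  induction body with
  | nil => simp
  | cons l ls ih =>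
    intro blocks cur hnf
    have hl : PySem.Str.strip l ≠ "$$" := hnf l (by simp)
    have hstep : pvAStep (blocks, cur, true) l = (blocks, cur ++ [l], true) := by
      simp [pvAStep, hl]
    simp only [List.foldl_cons]
    rw [hstep, ih blocks (cur ++ [l]) (fun x hx => hnf x (by simp [hx]))]
    simp

theorem pvTakeRun_all_nonblank (cs : List String) (h : ∀ l ∈ cs, PySem.Str.strip l ≠ "") :
    pvTakeRun cs = (cs, []) := by
  induction cs with
  | nil => simp [pvTakeRun]
  | cons c cs ih =>
    simp only [pvTakeRun]
    rw [if_neg (h c (by simp)), ih (fun x hx => h x (by simp [hx]))]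

theorem pvTakeRun_prefix_blank (cs : List String) (l : String) (ls : List String)
    (hcs : ∀ x ∈ cs, PySem.Str.strip x ≠ "") (hl : PySem.Str.strip l = "") :
    pvTakeRun (cs ++ l :: ls) = (cs, l :: ls) := by
  induction cs with
  | nil => simp [pvTakeRun, hl]
  | cons c cs ih =>
    simp only [List.cons_append, pvTakeRun]
    rw [if_neg (hcs c (by simp)), ih (fun x hx => hcs x (by simp [hx]))]

theorem pvTextBlocks_all_nonblank (cur : List String) (h : ∀ l ∈ cur, PySem.Str.strip l ≠ "") :
    pvTextBlocks cur = pvFlush cur := by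
  cases cur with
  | nil => simp [pvTextBlocks, pvFlush]
  | cons c cs =>
    rw [pvTextBlocks]
    rw [if_neg (h c (by simp))]
    rw [pvTakeRun_all_nonblank cs (fun x hx => h x (by simp [hx]))]
    simp [pvTextBlocks, pvFlush]

theorem pvFlushTb (pre : List String) : ∀ (cur : List String),
    (∀ l ∈ cur, PySem.Str.strip l ≠ "") →
    pvTbAux cur pre ++ pvFlush (pvCurAux cur pre) = pvTextBlocks (cur ++ pre) := by
  induction pre with
  | nil =>
    intro cur hc
    simp only [pvTbAux, pvCurAux, List.nil_append, List.append_nil]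
    exact (pvTextBlocks_all_nonblank cur hc).symm
  | cons l ls ih =>
    intro cur hc
    simp only [pvTbAux, pvCurAux]
    by_cases hb : PySem.Str.strip l = ""
    · rw [if_pos hb, if_pos hb]
      by_cases hcur : cur = []
      · subst hcur
        rw [if_pos rfl]
        rw [ih [] (by simp)]
        simp only [List.nil_append]
        rw [pvTextBlocks]
        rw [if_pos hb]
      · rw [if_neg hcur]
        rw [List.cons_append, ih [] (by simp)]
        obtain ⟨c, cs, rfl⟩ : ∃ c cs, cur = c :: cs := by
          cases cur with
          | nil => exact absurd rfl hcur
          | cons c cs => exact ⟨c, cs, rfl⟩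
        simp only [List.cons_append, List.nil_append]
        rw [pvTextBlocks]
        rw [if_neg (hc c (by simp))]
        rw [pvTakeRun_prefix_blank cs l ls (fun x hx => hc x (by simp [hx])) hb]
        have hTB : pvTextBlocks (l :: ls) = pvTextBlocks ls := by
          rw [pvTextBlocks, if_pos hb]
        simp [hTB]
    · rw [if_neg hb, if_neg hb]
      have hcl : ∀ x ∈ cur ++ [l], PySem.Str.strip x ≠ "" := by
        intro x hx
        rcases List.mem_append.mp hx with hx | hx
        · exact hc x hx
        · simp at hx; subst hx; exact hb
      rw [ih (cur ++ [l]) hcl]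
      simp [List.append_assoc]

theorem pvMain : ∀ (n : Nat) (lines blocks : List String), lines.length ≤ n →
    pvFinish (lines.foldl pvAStep (blocks, [], false)) = blocks ++ pvBlocks lines := by
  intro n
  induction n with
  | zero =>
    intro lines blocks hlen
    have : lines = [] := List.eq_nil_of_length_eq_zero (Nat.le_zero.mp hlen)
    subst this
    rw [pvBlocks_no_fence [] [] (by simp [pvBreakFence])]
    simp [pvTextBlocks, pvFinish]
  | succ n ih =>
    intro lines blocks hlen
    obtain ⟨pre, r, hp⟩ : ∃ pre r, pvBreakFence lines = (pre, r) := ⟨_, _, rfl⟩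
    have hsplit : pre ++ r = lines := by
      have := pvBreakFence_append lines; rw [hp] at this; simpa using this
    have hprenf : ∀ l ∈ pre, PySem.Str.strip l ≠ "$$" := by
      have := pvBreakFence_fst_no_fence lines; rw [hp] at this; simpa using this
    have hflush := pvFlushTb pre [] (by simp)
    simp only [List.nil_append] at hflush
    cases r with
    | nil =>
      have hl : lines = pre := by simpa using hsplit.symm
      subst hl
      rw [pvBlocks_no_fence lines lines hp]
      rw [pvFoldText lines blocks [] hprenf]
      unfold pvFinish
      by_cases hc : pvCurAux [] lines = []
      · simp [pvFlush, hc] at hflush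
        simp [hc, hflush]
      · simp [pvFlush, hc] at hflush
        simp [hc, hflush]
    | cons f rest =>
      have hf : PySem.Str.strip f = "$$" := by
        apply pvBreakFence_snd_head lines f rest
        rw [hp]
      have hstep : pvAStep (blocks ++ pvTbAux [] pre, pvCurAux [] pre, false) f
          = (blocks ++ pvTextBlocks pre, ["$$"], true) := by
        by_cases hc : pvCurAux [] pre = []
        · simp [pvFlush, hc] at hflush
          simp [pvAStep, hf, hc, hflush]
        · rw [pvFlush, if_neg hc] at hflush
          have : pvAStep (blocks ++ pvTbAux [] pre, pvCurAux [] pre, false) f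
              = (blocks ++ pvTbAux [] pre ++ [PySem.Str.join "\n" (pvCurAux [] pre)], ["$$"], true) := by
            simp [pvAStep, hf, hc]
          rw [this, List.append_assoc, hflush]
      rw [← hsplit, List.foldl_append]
      rw [pvFoldText pre blocks [] hprenf]
      simp only [List.foldl_cons]
      rw [hstep]
      obtain ⟨body, r2, hq⟩ : ∃ body r2, pvBreakFence rest = (body, r2) := ⟨_, _, rfl⟩
      have hsplit2 : body ++ r2 = rest := by
        have := pvBreakFence_append rest; rw [hq] at this; simpa using this
      have hbodynf : ∀ l ∈ body, PySem.Str.strip l ≠ "$$" := by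
        have := pvBreakFence_fst_no_fence rest; rw [hq] at this; simpa using this
      cases r2 with
      | nil =>
        have hr : rest = body := by simpa using hsplit2.symm
        subst hr
        rw [pvFoldMath rest (blocks ++ pvTextBlocks pre) ["$$"] hbodynf]
        rw [hsplit, pvBlocks_one_fence lines pre f rest rest hp hq]
        unfold pvFinish
        rw [if_neg (by simp)]
        simp
      | cons g rest2 =>
        have hg : PySem.Str.strip g = "$$" := by
          apply pvBreakFence_snd_head rest g rest2
          rw [hq]
        rw [← hsplit2, List.foldl_append]
        rw [pvFoldMath body (blocks ++ pvTextBlocks pre) ["$$"] hbodynf]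
        simp only [List.foldl_cons]
        have hstep2 : pvAStep (blocks ++ pvTextBlocks pre, ["$$"] ++ body, true) g
            = (blocks ++ pvTextBlocks pre ++ [PySem.Str.join "\n" (["$$"] ++ body ++ ["$$"])], [], false) := by
          simp [pvAStep, hg]
        rw [hstep2]
        have hlen2 : rest2.length ≤ n := by
          have h1 : lines.length = pre.length + (1 + (body.length + (1 + rest2.length))) := by
            rw [← hsplit, ← hsplit2]; simp; omega
          omega
        rw [ih rest2 _ hlen2]
        rw [hsplit2, hsplit, pvBlocks_two_fences lines pre f rest body g rest2 hp hq]
        simp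

-- ===== VERDICT (by name: the statement is the Claim_ definition above) =====
theorem md_to_blocks_py_spec : Claim_equal_md_to_blocks_py := by
  intro md _
  unfold Spec_md_to_blocks_py md_to_blocks_py md_to_blocks_py_alt
  have := pvMain ((PySem.Str.split? md "\n").getD []).length
    ((PySem.Str.split? md "\n").getD []) [] le_rfl
  simp only [List.nil_append] at this
  rw [← this]
  rfl
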